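-- pv_equiv track=rewrite | github.com/CommittedTeam/status_prediction | prediction/data_collection.py | final_status
-- ===== SOURCE A (Python) =====
-- def final_status(statuses,completion):
--     fails = ["error","failure","cancelled","timed_out","action_required","startup_failure"]
--     final_status = []
--     if not statuses and not completion:
--         final_status.append("N/A")
--     for status in fails:
--         if status in statuses:
--             final_status.append("fail")
--             break
--     if "pending" in statuses:
--         final_status.append("pending")
--     else:
--         final_status.append("pass")
--
--     return final_status[0]
-- ===== SOURCE B (Python) =====
-- def final_status(statuses, completion):
--     if not statuses and not completion:
--         return "N/A"
--     sev = {"error": 2, "failure": 2, "cancelled": 2, "timed_out": 2,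
--            "action_required": 2, "startup_failure": 2, "pending": 1}
--     level = 0
--     for s in statuses:
--         level = max(level, sev.get(s, 0))
--     return ("pass", "pending", "fail")[level]
-- ===== Notes on version B (the rewrite author's own statement) =====
-- stated objective: alternative
-- what changed: B makes a single pass over statuses computing the maximum severity level from a severity dictionary (fail=2, pending=1, other=0) and indexes a label table, instead of A's list accumulator scanning the fails list with membership tests; correct because A's priority order fail > pending > pass coincides with the maximum severity.
import Mathlib
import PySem

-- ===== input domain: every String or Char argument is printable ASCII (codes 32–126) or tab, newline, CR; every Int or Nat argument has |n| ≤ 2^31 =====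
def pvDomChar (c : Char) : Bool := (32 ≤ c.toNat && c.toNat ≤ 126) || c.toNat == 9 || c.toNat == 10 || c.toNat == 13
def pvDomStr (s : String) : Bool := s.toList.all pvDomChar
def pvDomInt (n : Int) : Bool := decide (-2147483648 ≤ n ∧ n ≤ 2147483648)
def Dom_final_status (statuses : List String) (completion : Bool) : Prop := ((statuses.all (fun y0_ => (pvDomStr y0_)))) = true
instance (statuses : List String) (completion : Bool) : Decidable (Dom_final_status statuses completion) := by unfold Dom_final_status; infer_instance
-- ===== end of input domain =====

-- B computes one max-severity pass over statuses with a severity dict and a label table, instead of A's accumulator list scanning the fails list (alternative algorithm).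


-- ===== PORT A =====
-- the 'for status in fails: if status in statuses: append "fail"; break' loop
def failsLoop : List String → List String → List String → List String
  | [], _, acc => acc
  | f :: rest, statuses, acc =>
      if f ∈ statuses then acc ++ ["fail"] else failsLoop rest statuses acc

-- transliteration of A: build the list of appended labels, return element 0
-- (the list is always nonempty, so Python's final_status[0] never raises; .getD "" is unreachable)
def final_status (statuses : List String) (completion : Bool) : String :=
  let fails : List String := ["error", "failure", "cancelled", "timed_out", "action_required", "startup_failure"]
  let acc : List String := []
  let acc := if statuses = [] ∧ completion = false then acc ++ ["N/A"] else acc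
  let acc := failsLoop fails statuses acc
  let acc := if "pending" ∈ statuses then acc ++ ["pending"] else acc ++ ["pass"]
  (PySem.List.pyGet? acc 0).getD ""

-- ===== PORT B =====
-- the severity dict literal of Source B
def sevDict : PySem.Dict String Int :=
  PySem.Dict.mk [("error", 2), ("failure", 2), ("cancelled", 2), ("timed_out", 2),
                 ("action_required", 2), ("startup_failure", 2), ("pending", 1)]

-- transliteration of B: max-severity fold over statuses, then tuple indexing
-- (level is always 0, 1 or 2, so the tuple index never raises; .getD "" is unreachable)
def final_status_alt (statuses : List String) (completion : Bool) : String :=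
  if statuses = [] ∧ completion = false then "N/A"
  else
    let level : Int := statuses.foldl (fun l s => max l (sevDict.getD s 0)) 0
    (PySem.List.pyGet? ["pass", "pending", "fail"] level).getD ""

-- ===== PRECONDITION & SPEC =====
def Spec_final_status (statuses : List String) (completion : Bool) (out : String) : Prop := out = final_status_alt statuses completion
instance (statuses : List String) (completion : Bool) (out : String) : Decidable (Spec_final_status statuses completion out) := by unfold Spec_final_status; infer_instance

-- ===== CLAIM (what is proved, stated in full; the proofs are below) =====
def Claim_equal_final_status : Prop := ∀ (statuses : List String) (completion : Bool), Dom_final_status statuses completion → Spec_final_status statuses completion (final_status statuses completion)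

-- ===== LEMMAS AND PROOFS =====

-- severity of one status string
def sev (s : String) : Int := sevDict.getD s 0

-- maximum severity of a list of statuses
def maxsev (xs : List String) : Int := (xs.map sev).foldr max 0

lemma sev_le_two (s : String) : sev s ≤ 2 := by
  unfold sev sevDict
  simp only [PySem.Dict.getD_eq_get?_getD, PySem.Dict.get?_mk_cons]
  split_ifs <;> simp [PySem.Dict.get?]

lemma sev_le_one_of_ne (s : String)
    (h1 : s ≠ "error") (h2 : s ≠ "failure") (h3 : s ≠ "cancelled") (h4 : s ≠ "timed_out")
    (h5 : s ≠ "action_required") (h6 : s ≠ "startup_failure") : sev s ≤ 1 := by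
  unfold sev sevDict
  simp only [PySem.Dict.getD_eq_get?_getD, PySem.Dict.get?_mk_cons]
  split_ifs <;> simp_all [PySem.Dict.get?]

lemma sev_eq_zero_of_ne (s : String)
    (h1 : s ≠ "error") (h2 : s ≠ "failure") (h3 : s ≠ "cancelled") (h4 : s ≠ "timed_out")
    (h5 : s ≠ "action_required") (h6 : s ≠ "startup_failure") (h7 : s ≠ "pending") : sev s = 0 := by
  unfold sev sevDict
  simp only [PySem.Dict.getD_eq_get?_getD, PySem.Dict.get?_mk_cons]
  split_ifs <;> simp_all [PySem.Dict.get?]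

lemma maxsev_nonneg (xs : List String) : 0 ≤ maxsev xs := by
  induction xs with
  | nil => simp [maxsev]
  | cons x t ih => simp only [maxsev, List.map_cons, List.foldr_cons] at ih ⊢; omega

lemma maxsev_cons (x : String) (t : List String) : maxsev (x :: t) = max (sev x) (maxsev t) := by
  simp [maxsev]

lemma le_maxsev {x : String} {xs : List String} (h : x ∈ xs) : sev x ≤ maxsev xs := by
  induction xs with
  | nil => cases h
  | cons y t ih =>
      rw [maxsev_cons]
      rcases List.mem_cons.mp h with h | h
      · subst h; exact le_max_left _ _
      · exact le_trans (ih h) (le_max_right _ _)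

lemma maxsev_le {xs : List String} {c : Int} (hc : 0 ≤ c) (h : ∀ x ∈ xs, sev x ≤ c) :
    maxsev xs ≤ c := by
  induction xs with
  | nil => simpa [maxsev] using hc
  | cons y t ih =>
      rw [maxsev_cons]
      exact max_le (h y (List.mem_cons_self)) (ih fun x hx => h x (List.mem_cons_of_mem _ hx))

lemma foldl_max_sev (xs : List String) : ∀ l : Int, 0 ≤ l →
    xs.foldl (fun l s => max l (sevDict.getD s 0)) l = max l (maxsev xs) := by
  induction xs with
  | nil => intro l hl; simp [maxsev]; omega
  | cons x t ih =>
      intro l hl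
      have h0 : (0 : Int) ≤ max l (sev x) := le_trans hl (le_max_left _ _)
      simp only [List.foldl_cons]
      show t.foldl _ (max l (sev x)) = _
      rw [ih _ h0, maxsev_cons, max_assoc]

lemma A_char (statuses : List String) (completion : Bool)
    (h : ¬(statuses = [] ∧ completion = false)) :
    final_status statuses completion =
      if "error" ∈ statuses ∨ "failure" ∈ statuses ∨ "cancelled" ∈ statuses ∨
         "timed_out" ∈ statuses ∨ "action_required" ∈ statuses ∨ "startup_failure" ∈ statuses
      then "fail" else if "pending" ∈ statuses then "pending" else "pass" := by
  unfold final_status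
  simp only [if_neg h, failsLoop]
  split_ifs <;> simp_all [PySem.List.pyGet?, PySem.List.pyIdx?]

lemma B_char (statuses : List String) (completion : Bool)
    (h : ¬(statuses = [] ∧ completion = false)) :
    final_status_alt statuses completion =
      if "error" ∈ statuses ∨ "failure" ∈ statuses ∨ "cancelled" ∈ statuses ∨
         "timed_out" ∈ statuses ∨ "action_required" ∈ statuses ∨ "startup_failure" ∈ statuses
      then "fail" else if "pending" ∈ statuses then "pending" else "pass" := by
  unfold final_status_alt
  simp only [if_neg h]
  rw [foldl_max_sev statuses 0 le_rfl, max_eq_right (maxsev_nonneg statuses)]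
  by_cases hF : "error" ∈ statuses ∨ "failure" ∈ statuses ∨ "cancelled" ∈ statuses ∨
      "timed_out" ∈ statuses ∨ "action_required" ∈ statuses ∨ "startup_failure" ∈ statuses
  · have h2 : maxsev statuses = 2 := by
      refine le_antisymm (maxsev_le (by norm_num) fun x _ => sev_le_two x) ?_
      rcases hF with h | h | h | h | h | h <;>
        · have := le_maxsev h; simpa [sev, sevDict] using this
    rw [h2, if_pos hF]; rfl
  · push Not at hF
    obtain ⟨h1, h2, h3, h4, h5, h6⟩ := hF
    by_cases hP : "pending" ∈ statuses
    · have hm : maxsev statuses = 1 := by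
        refine le_antisymm (maxsev_le (by norm_num) fun x hx => ?_) ?_
        · exact sev_le_one_of_ne x (fun e => h1 (e ▸ hx)) (fun e => h2 (e ▸ hx))
            (fun e => h3 (e ▸ hx)) (fun e => h4 (e ▸ hx)) (fun e => h5 (e ▸ hx))
            (fun e => h6 (e ▸ hx))
        · have := le_maxsev hP; simpa [sev, sevDict] using this
      rw [hm, if_neg (by tauto), if_pos hP]; rfl
    · have hm : maxsev statuses = 0 := by
        refine le_antisymm (maxsev_le le_rfl fun x hx => ?_) (maxsev_nonneg _)
        exact le_of_eq (sev_eq_zero_of_ne x (fun e => h1 (e ▸ hx)) (fun e => h2 (e ▸ hx))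
          (fun e => h3 (e ▸ hx)) (fun e => h4 (e ▸ hx)) (fun e => h5 (e ▸ hx))
          (fun e => h6 (e ▸ hx)) (fun e => hP (e ▸ hx)))
      rw [hm, if_neg (by tauto), if_neg hP]; rfl

-- ===== VERDICT (by name: the statement is the Claim_ definition above) =====
theorem final_status_spec : Claim_equal_final_status := by
  intro statuses completion _
  unfold Spec_final_status
  by_cases h : statuses = [] ∧ completion = false
  · obtain ⟨h1, h2⟩ := h; subst h1; subst h2; decide
  · rw [A_char statuses completion h, B_char statuses completion h]
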